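-- pv_equiv track=rewrite | github.com/tliddle1/advent-of-code | 2023/day1.py | caluclateCalibrationValue
-- ===== SOURCE A (Python) =====
-- digits = {
--     "one": 1,
--     "two": 2,
--     "three": 3,
--     "four": 4,
--     "five": 5,
--     "six": 6,
--     "seven": 7,
--     "eight": 8,
--     "nine": 9,
--     "zero": 0,
-- }
--
-- def caluclateCalibrationValue(n):
--     result = 0
--
--     letters = ""
--     for i in range(len(n)):
--         c = n[i]
--         try:
--             result += int(c)*10
--             break
--         except:
--             letters += c
--             found = False
--             for d in digits:
--                 if d in letters:
--                     result += digits[d]*10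
--                     found = True
--                     break
--             if found:
--                 break
--
--     letters = ""
--     for i in range(len(n)-1,-1,-1):
--         c = n[i]
--         try:
--             result += int(c)
--             break
--         except:
--             letters += c
--             found = False
--             for d in digits:
--                 if d in letters[::-1]:
--                     result += digits[d]
--                     found = True
--                     break
--             if found:
--                 break
--
--     return result
-- ===== SOURCE B (Python) =====
-- digits = {
--     "one": 1,
--     "two": 2,
--     "three": 3,
--     "four": 4,
--     "five": 5,
--     "six": 6,
--     "seven": 7,
--     "eight": 8,
--     "nine": 9,
--     "zero": 0,
-- }
--
-- def caluclateCalibrationValue(n):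
--     # Single left-to-right scan: a spelled digit first appears when its last
--     # letter is read, so only an O(1) endswith check per position is needed.
--     tens = 0
--     for i in range(len(n)):
--         c = n[i]
--         if "0" <= c <= "9":
--             tens = ord(c) - 48
--             break
--         found = False
--         for d in digits:
--             if n.endswith(d, 0, i + 1):
--                 tens = digits[d]
--                 found = True
--                 break
--         if found:
--             break
--     # Single right-to-left scan: a spelled digit first appears (going left)
--     # when its first letter is reached, so only startswith at i is needed.
--     ones = 0
--     for i in range(len(n) - 1, -1, -1):
--         c = n[i]
--         if "0" <= c <= "9":
--             ones = ord(c) - 48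
--             break
--         found = False
--         for d in digits:
--             if n.startswith(d, i):
--                 ones = digits[d]
--                 found = True
--                 break
--         if found:
--             break
--     return tens * 10 + ones
-- ===== Notes on version B (the rewrite author's own statement) =====
-- stated objective: faster
-- what changed: Replaces A's growing accumulator string with a full substring search of all ten digit words at every position (and try/except int) by a single scan that does only a constant-length endswith/startswith check at each position (and a char range test), exploiting that a spelled digit first appears exactly when its last (resp. first) letter is reached.
import Mathlib
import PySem

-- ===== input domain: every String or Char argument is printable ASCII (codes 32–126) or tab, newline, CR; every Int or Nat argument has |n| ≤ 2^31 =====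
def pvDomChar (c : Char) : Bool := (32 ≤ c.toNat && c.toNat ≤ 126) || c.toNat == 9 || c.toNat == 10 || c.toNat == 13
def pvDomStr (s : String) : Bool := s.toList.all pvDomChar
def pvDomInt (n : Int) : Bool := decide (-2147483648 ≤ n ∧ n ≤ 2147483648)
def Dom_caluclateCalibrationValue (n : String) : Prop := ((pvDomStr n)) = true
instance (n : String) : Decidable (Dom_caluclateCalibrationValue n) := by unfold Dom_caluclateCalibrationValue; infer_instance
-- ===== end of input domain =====

-- B replaces A's growing-accumulator substring search (O(n^2)) by a single scan with a
-- constant-length endswith/startswith check at each position (O(n)); same return value.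

-- module-level constant `digits` (shared by both Python files)
def pvDigits : List (List Char × Int) :=
  [(['o','n','e'], 1), (['t','w','o'], 2), (['t','h','r','e','e'], 3), (['f','o','u','r'], 4),
   (['f','i','v','e'], 5), (['s','i','x'], 6), (['s','e','v','e','n'], 7), (['e','i','g','h','t'], 8),
   (['n','i','n','e'], 9), (['z','e','r','o'], 0)]

-- ===== PORT A =====
-- `try: int(c)` on a SINGLE printable-ASCII character: succeeds exactly on '0'..'9'
-- (whitespace-only or sign-only raises ValueError); exact hand port on the stated ASCII domain.
def pvTryInt (c : Char) : Option Int :=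
  if '0' ≤ c ∧ c ≤ '9' then some ((c.toNat : Int) - 48) else none

-- first loop of A: scans n left to right, `letters` accumulates the scanned prefix,
-- `d in letters` is a full substring search over the dict in insertion order
def pvFwdA : List Char → List Char → Int
  | [], _ => 0
  | c :: rest, letters =>
    match pvTryInt c with
    | some k => k * 10
    | none =>
      let letters' := letters ++ [c]
      match pvDigits.find? (fun dv => PySem.Chars.isIn dv.1 letters') with
      | some dv => dv.2 * 10
      | none => pvFwdA rest letters'

-- second loop of A: scans n right to left (input here is n reversed), `letters` accumulates
-- the scanned chars in scan order, the search is `d in letters[::-1]`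
def pvBwdA : List Char → List Char → Int
  | [], _ => 0
  | c :: rest, letters =>
    match pvTryInt c with
    | some k => k
    | none =>
      let letters' := letters ++ [c]
      match pvDigits.find? (fun dv => PySem.Chars.isIn dv.1 letters'.reverse) with
      | some dv => dv.2
      | none => pvBwdA rest letters'

def caluclateCalibrationValue (n : String) : Int :=
  pvFwdA n.toList [] + pvBwdA n.toList.reverse []

-- ===== PORT B =====
-- first loop of B: `seen` is the scanned prefix n[:i+1]; `n.endswith(d, 0, i+1)`
def pvFwdB : List Char → List Char → Int
  | [], _ => 0
  | c :: rest, seen =>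
    if '0' ≤ c ∧ c ≤ '9' then (c.toNat : Int) - 48
    else
      let seen' := seen ++ [c]
      match pvDigits.find? (fun dv => PySem.Chars.endswith seen' dv.1) with
      | some dv => dv.2
      | none => pvFwdB rest seen'

-- second loop of B: input is n reversed, `suf` is the suffix n[i+1:]; `n.startswith(d, i)`
def pvBwdB : List Char → List Char → Int
  | [], _ => 0
  | c :: rest, suf =>
    if '0' ≤ c ∧ c ≤ '9' then (c.toNat : Int) - 48
    else
      let suf' := c :: suf
      match pvDigits.find? (fun dv => PySem.Chars.startswith suf' dv.1) with
      | some dv => dv.2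
      | none => pvBwdB rest suf'

def caluclateCalibrationValue_alt (n : String) : Int :=
  10 * pvFwdB n.toList [] + pvBwdB n.toList.reverse []

-- ===== PRECONDITION & SPEC =====
def Spec_caluclateCalibrationValue (n : String) (out : Int) : Prop := out = caluclateCalibrationValue_alt n
instance (n : String) (out : Int) : Decidable (Spec_caluclateCalibrationValue n out) := by unfold Spec_caluclateCalibrationValue; infer_instance

-- ===== CLAIM (what is proved, stated in full; the proofs are below) =====
def Claim_equal_caluclateCalibrationValue : Prop := ∀ (n : String), Dom_caluclateCalibrationValue n → Spec_caluclateCalibrationValue n (caluclateCalibrationValue n)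

-- ===== LEMMAS AND PROOFS =====

-- a substring occurrence that is new after appending c must end at c, i.e. be a suffix
lemma pv_infix_snoc_iff {w s : List Char} {c : Char} (h : ¬ w <:+: s) :
    w <:+: s ++ [c] ↔ w <:+ s ++ [c] := by
  constructor
  · rintro ⟨t1, t2, ht⟩
    rcases t2.eq_nil_or_concat with rfl | ⟨t2', d, rfl⟩
    · exact ⟨t1, by simpa using ht⟩
    · exfalso
      apply h
      have : (t1 ++ w ++ t2') ++ [d] = s ++ [c] := by simpa [List.concat_eq_append] using ht
      have h2 := (List.append_inj' this rfl).1
      exact ⟨t1, t2', h2⟩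
  · exact fun h' => h'.isInfix

-- symmetrically, a substring occurrence that is new after prepending c must start at c
lemma pv_infix_cons_iff {w s : List Char} {c : Char} (h : ¬ w <:+: s) :
    w <:+: c :: s ↔ w <+: c :: s := by
  constructor
  · rintro ⟨t1, t2, ht⟩
    rcases t1 with _ | ⟨d, t1'⟩
    · exact ⟨t2, by simpa using ht⟩
    · exfalso
      apply h
      have h2 : t1' ++ w ++ t2 = s := by simpa using (by simpa using ht : d = c ∧ t1' ++ (w ++ t2) = s).2
      exact ⟨t1', t2, h2⟩
  · exact fun h' => h'.isInfix

lemma pv_find?_congr {α : Type} (l : List α) (p q : α → Bool) (h : ∀ a ∈ l, p a = q a) :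
    l.find? p = l.find? q := by
  induction l with
  | nil => rfl
  | cons x xs ih =>
    have hx := h x (by simp)
    simp only [List.find?_cons, hx]
    cases q x with
    | true => rfl
    | false => exact ih (fun a ha => h a (by simp [ha]))

-- A's forward loop equals 10 × B's, as long as no digit word occurs in the prefix so far
lemma pv_fwd_eq : ∀ (rest letters : List Char),
    (∀ dv ∈ pvDigits, ¬ dv.1 <:+: letters) →
    pvFwdA rest letters = 10 * pvFwdB rest letters := by
  intro rest
  induction rest with
  | nil => intro letters _; simp [pvFwdA, pvFwdB]
  | cons c rest ih =>
    intro letters h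
    by_cases hd : '0' ≤ c ∧ c ≤ '9'
    · simp [pvFwdA, pvFwdB, pvTryInt, hd]; ring
    · have hfind : pvDigits.find? (fun dv => PySem.Chars.isIn dv.1 (letters ++ [c]))
          = pvDigits.find? (fun dv => PySem.Chars.endswith (letters ++ [c]) dv.1) := by
        apply pv_find?_congr
        intro dv hdv
        rw [Bool.eq_iff_iff, PySem.Chars.isIn_iff_infix, PySem.Chars.endswith_iff]
        exact pv_infix_snoc_iff (h dv hdv)
      simp only [pvFwdA, pvFwdB, pvTryInt, hd, if_false, hfind]
      cases hres : pvDigits.find? (fun dv => PySem.Chars.endswith (letters ++ [c]) dv.1) with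
      | some dv => simp; ring
      | none =>
        simp only []
        apply ih
        intro dv hdv
        have := List.find?_eq_none.mp (hfind ▸ hres) dv hdv
        exact (PySem.Chars.isIn_eq_false_iff _ _).mp (by simpa using this)

-- A's backward loop equals B's, as long as no digit word occurs in the suffix so far
lemma pv_bwd_eq : ∀ (rest letters : List Char),
    (∀ dv ∈ pvDigits, ¬ dv.1 <:+: letters.reverse) →
    pvBwdA rest letters = pvBwdB rest letters.reverse := by
  intro rest
  induction rest with
  | nil => intro letters _; simp [pvBwdA, pvBwdB]
  | cons c rest ih =>
    intro letters h
    by_cases hd : '0' ≤ c ∧ c ≤ '9'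
    · simp [pvBwdA, pvBwdB, pvTryInt, hd]
    · have hrev : (letters ++ [c]).reverse = c :: letters.reverse := by simp
      have hfind : pvDigits.find? (fun dv => PySem.Chars.isIn dv.1 (letters ++ [c]).reverse)
          = pvDigits.find? (fun dv => PySem.Chars.startswith (c :: letters.reverse) dv.1) := by
        apply pv_find?_congr
        intro dv hdv
        rw [hrev, Bool.eq_iff_iff, PySem.Chars.isIn_iff_infix, PySem.Chars.startswith_iff]
        exact pv_infix_cons_iff (h dv hdv)
      simp only [pvBwdA, pvBwdB, pvTryInt, hd, if_false, hfind]
      cases hres : pvDigits.find? (fun dv => PySem.Chars.startswith (c :: letters.reverse) dv.1) with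
      | some dv => simp
      | none =>
        simp only []
        rw [← hrev]
        apply ih
        intro dv hdv
        have := List.find?_eq_none.mp (hfind ▸ hres) dv hdv
        rw [hrev] at this ⊢
        exact (PySem.Chars.isIn_eq_false_iff _ _).mp (by simpa [hrev] using this)

lemma pv_no_word_in_nil : ∀ dv ∈ pvDigits, ¬ dv.1 <:+: ([] : List Char) := by decide

-- ===== VERDICT (by name: the statement is the Claim_ definition above) =====
theorem caluclateCalibrationValue_spec : Claim_equal_caluclateCalibrationValue := by
  intro n _
  unfold Spec_caluclateCalibrationValue caluclateCalibrationValue caluclateCalibrationValue_alt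
  rw [pv_fwd_eq n.toList [] pv_no_word_in_nil,
      show (pvBwdB n.toList.reverse [] : Int) = pvBwdB n.toList.reverse (([] : List Char)).reverse from rfl,
      ← pv_bwd_eq n.toList.reverse [] (by simpa using pv_no_word_in_nil)]
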